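-- pv_equiv track=rewrite | github.com/pypi-data/pypi-mirror-89 | packages/uo-parser-beta/uo-parser-beta-0.1.3.tar.gz/uo-parser-beta-0.1.3/merino/utils/tokenizer_utils.py | split_to_subsequences
-- ===== SOURCE A (Python) =====
-- def split_to_subsequences(wordpieces, wordpiece_labels, sent_mwt_labels, wordpiece_ends, end_piece_ids,
--                           max_input_length):
--     subsequences = []
--     subseq = [[], [], [], []]
--     sub_mwt_labels = []
--     mwt_id = 0
--     for wp_wpid, wl, we in zip(wordpieces, wordpiece_labels, wordpiece_ends):
--         wp, wpid = wp_wpid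
--         subseq[0].append((wp, wpid))
--         subseq[1].append(wl)
--         if wl == 3 or wl == 4:
--             sub_mwt_labels.append(sent_mwt_labels[mwt_id])
--             mwt_id += 1
--         subseq[3].append(we)
--         if wpid in end_piece_ids and len(subseq[0]) >= max_input_length - 10:
--             subsequences.append((subseq[0], subseq[1], sub_mwt_labels, subseq[3], end_piece_ids))
--
--             subseq = [[], [], [], []]
--             sub_mwt_labels = []
--
--     if len(subseq[0]) > 0:
--         subsequences.append((subseq[0], subseq[1], sub_mwt_labels, subseq[3], end_piece_ids))
--     return subsequences
-- ===== SOURCE B (Python) =====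
-- def split_to_subsequences(wordpieces, wordpiece_labels, sent_mwt_labels, wordpiece_ends, end_piece_ids,
--                           max_input_length):
--     # Peel off one group at a time: find the first cut point of the remaining
--     # zipped items, slice out the whole group at once, consume the matching
--     # number of MWT labels, and repeat on the remainder.
--     need = max_input_length - 10
--     zs = list(zip(wordpieces, wordpiece_labels, wordpiece_ends))
--     out = []
--     pos = 0
--     while zs:
--         k = None
--         for j, ((wp, wpid), wl, we) in enumerate(zs, 1):
--             if wpid in end_piece_ids and j >= need:
--                 k = j
--                 break
--         if k is None:
--             k = len(zs)
--         seg = zs[:k]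
--         c = sum(1 for _, wl, _ in seg if wl == 3 or wl == 4)
--         out.append(([t[0] for t in seg], [t[1] for t in seg],
--                     sent_mwt_labels[pos:pos + c], [t[2] for t in seg], end_piece_ids))
--         pos += c
--         zs = zs[k:]
--     return out
-- ===== Notes on version B (the rewrite author's own statement) =====
-- stated objective: alternative
-- what changed: A's single element-by-element loop carrying four growing accumulator lists and a global mwt index is replaced by a group-peeling pass: find the next cut boundary of the remaining zipped items, slice the whole group and its block of MWT labels out at once, and repeat on the remainder.
import Mathlib
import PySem

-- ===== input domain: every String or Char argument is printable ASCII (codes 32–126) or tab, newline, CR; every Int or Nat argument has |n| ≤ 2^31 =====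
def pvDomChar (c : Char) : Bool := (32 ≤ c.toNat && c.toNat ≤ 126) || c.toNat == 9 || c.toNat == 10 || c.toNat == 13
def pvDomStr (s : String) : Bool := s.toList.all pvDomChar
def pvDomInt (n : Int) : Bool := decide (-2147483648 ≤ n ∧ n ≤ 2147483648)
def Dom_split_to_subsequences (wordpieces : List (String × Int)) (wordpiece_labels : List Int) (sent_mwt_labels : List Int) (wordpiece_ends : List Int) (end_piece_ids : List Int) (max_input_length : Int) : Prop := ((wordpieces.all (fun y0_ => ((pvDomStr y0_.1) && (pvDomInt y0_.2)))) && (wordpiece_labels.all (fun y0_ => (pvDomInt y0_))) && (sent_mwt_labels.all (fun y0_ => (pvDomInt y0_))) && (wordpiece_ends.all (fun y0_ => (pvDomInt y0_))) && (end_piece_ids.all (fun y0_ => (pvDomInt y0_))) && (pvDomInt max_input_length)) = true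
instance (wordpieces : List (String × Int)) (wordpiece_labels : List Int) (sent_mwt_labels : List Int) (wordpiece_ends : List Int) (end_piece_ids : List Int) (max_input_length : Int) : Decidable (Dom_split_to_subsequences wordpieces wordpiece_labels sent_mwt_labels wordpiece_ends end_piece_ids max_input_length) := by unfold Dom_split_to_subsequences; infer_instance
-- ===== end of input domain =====

-- ===== PORT A =====
-- B peels whole groups off the zipped input (boundary search + slicing) instead of
-- A's element-by-element accumulator loop; same asymptotic cost, different decomposition.

-- A-side: the for-loop over zip(...) as structural recursion over the zipped list,
-- with the same state (subsequences, subseq[0], subseq[1], sub_mwt_labels, subseq[3], mwt_id).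
-- sent_mwt_labels[mwt_id] is ported as getD _ 0: Pre_ guarantees the index is in range
-- (Python raises IndexError exactly where it is not; those inputs are outside Pre_).
def loopA (sent epids : List Int) (mil : Int) :
    List ((String × Int) × Int × Int) →
    List ((List (String × Int)) × List Int × List Int × List Int × List Int) →
    List (String × Int) → List Int → List Int → List Int → Nat →
    List ((List (String × Int)) × List Int × List Int × List Int × List Int)
  | [], acc, s0, s1, subm, s3, _ =>
      if s0.length > 0 then acc ++ [(s0, s1, subm, s3, epids)] else acc
  | ((wp, wpid), wl, we) :: rest, acc, s0, s1, subm, s3, mwt =>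
      if wpid ∈ epids ∧ ((s0 ++ [(wp, wpid)]).length : Int) ≥ mil - 10 then
        loopA sent epids mil rest
          (acc ++ [(s0 ++ [(wp, wpid)], s1 ++ [wl],
                    (if wl = 3 ∨ wl = 4 then subm ++ [sent.getD mwt 0] else subm),
                    s3 ++ [we], epids)])
          [] [] [] [] (if wl = 3 ∨ wl = 4 then mwt + 1 else mwt)
      else
        loopA sent epids mil rest acc (s0 ++ [(wp, wpid)]) (s1 ++ [wl])
          (if wl = 3 ∨ wl = 4 then subm ++ [sent.getD mwt 0] else subm) (s3 ++ [we])
          (if wl = 3 ∨ wl = 4 then mwt + 1 else mwt)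

def split_to_subsequences (wordpieces : List (String × Int)) (wordpiece_labels : List Int) (sent_mwt_labels : List Int) (wordpiece_ends : List Int) (end_piece_ids : List Int) (max_input_length : Int) : List ((List (String × Int)) × List Int × List Int × List Int × List Int) :=
  loopA sent_mwt_labels end_piece_ids max_input_length
    (wordpieces.zip (wordpiece_labels.zip wordpiece_ends)) [] [] [] [] [] 0

-- ===== PORT B =====
-- B-side: the inner `for j, ... in enumerate(zs, 1)` boundary search of Source B.
-- Returns the 1-based cut position (some k) or none if no cut exists.
def cutZ (epids : List Int) (need : Int) :
    List ((String × Int) × Int × Int) → Int → Option Nat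
  | [], _ => none
  | ((_, wpid), _, _) :: rest, j =>
      if wpid ∈ epids ∧ j ≥ need then some 1
      else (cutZ epids need rest (j + 1)).map Nat.succ

-- B-side: the `while zs:` loop of Source B, one group peeled per step.  The Nat fuel
-- (initially zs.length, always sufficient since every step drops ≥ 1 item) only
-- makes the recursion structural; it changes no computed value.
def peelF (epids : List Int) (need : Int) :
    Nat → List ((String × Int) × Int × Int) → List Int →
    List ((List (String × Int)) × List Int × List Int × List Int × List Int)
  | _, [], _ => []
  | 0, _ :: _, _ => []
  | fuel + 1, z :: zs, sent =>
      match cutZ epids need (z :: zs) 1 with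
      | none =>
          [((z :: zs).map (·.1), (z :: zs).map (·.2.1),
            sent.take ((z :: zs).countP (fun t => t.2.1 == 3 || t.2.1 == 4)),
            (z :: zs).map (·.2.2), epids)]
      | some k =>
          (((z :: zs).take k).map (·.1), ((z :: zs).take k).map (·.2.1),
           sent.take (((z :: zs).take k).countP (fun t => t.2.1 == 3 || t.2.1 == 4)),
           ((z :: zs).take k).map (·.2.2), epids)
            :: peelF epids need fuel ((z :: zs).drop k)
                 (sent.drop (((z :: zs).take k).countP (fun t => t.2.1 == 3 || t.2.1 == 4)))

def peel (epids : List Int) (need : Int)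
    (zs : List ((String × Int) × Int × Int)) (sent : List Int) :
    List ((List (String × Int)) × List Int × List Int × List Int × List Int) :=
  peelF epids need zs.length zs sent

def split_to_subsequences_alt (wordpieces : List (String × Int)) (wordpiece_labels : List Int) (sent_mwt_labels : List Int) (wordpiece_ends : List Int) (end_piece_ids : List Int) (max_input_length : Int) : List ((List (String × Int)) × List Int × List Int × List Int × List Int) :=
  peel end_piece_ids (max_input_length - 10)
    (wordpieces.zip (wordpiece_labels.zip wordpiece_ends)) sent_mwt_labels

-- ===== PRECONDITION & SPEC =====
-- Pre_ excludes exactly the inputs where A raises IndexError: when the zipped items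
-- need more MWT labels (labels 3/4) than sent_mwt_labels provides.
def Pre_split_to_subsequences (wordpieces : List (String × Int)) (wordpiece_labels : List Int) (sent_mwt_labels : List Int) (wordpiece_ends : List Int) (end_piece_ids : List Int) (max_input_length : Int) : Prop :=
  (wordpieces.zip (wordpiece_labels.zip wordpiece_ends)).countP
      (fun t => t.2.1 == 3 || t.2.1 == 4) ≤ sent_mwt_labels.length
instance (wordpieces : List (String × Int)) (wordpiece_labels : List Int) (sent_mwt_labels : List Int) (wordpiece_ends : List Int) (end_piece_ids : List Int) (max_input_length : Int) : Decidable (Pre_split_to_subsequences wordpieces wordpiece_labels sent_mwt_labels wordpiece_ends end_piece_ids max_input_length) := by unfold Pre_split_to_subsequences; infer_instance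

def pvWitness_split_to_subsequences : (List (String × Int)) × List Int × List Int × List Int × List Int × Int :=
  ([("a", 1), ("b", 2)], [3, 0], [5], [0, 1], [2], 5)

def Spec_split_to_subsequences (wordpieces : List (String × Int)) (wordpiece_labels : List Int) (sent_mwt_labels : List Int) (wordpiece_ends : List Int) (end_piece_ids : List Int) (max_input_length : Int) (out : List ((List (String × Int)) × List Int × List Int × List Int × List Int)) : Prop := out = split_to_subsequences_alt wordpieces wordpiece_labels sent_mwt_labels wordpiece_ends end_piece_ids max_input_length
instance (wordpieces : List (String × Int)) (wordpiece_labels : List Int) (sent_mwt_labels : List Int) (wordpiece_ends : List Int) (end_piece_ids : List Int) (max_input_length : Int) (out : List ((List (String × Int)) × List Int × List Int × List Int × List Int)) : Decidable (Spec_split_to_subsequences wordpieces wordpiece_labels sent_mwt_labels wordpiece_ends end_piece_ids max_input_length out) := by unfold Spec_split_to_subsequences; infer_instance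

-- ===== CLAIM =====
def Claim_equal_split_to_subsequences : Prop := ∀ (wordpieces : List (String × Int)) (wordpiece_labels : List Int) (sent_mwt_labels : List Int) (wordpiece_ends : List Int) (end_piece_ids : List Int) (max_input_length : Int), Dom_split_to_subsequences wordpieces wordpiece_labels sent_mwt_labels wordpiece_ends end_piece_ids max_input_length → Pre_split_to_subsequences wordpieces wordpiece_labels sent_mwt_labels wordpiece_ends end_piece_ids max_input_length → Spec_split_to_subsequences wordpieces wordpiece_labels sent_mwt_labels wordpiece_ends end_piece_ids max_input_length (split_to_subsequences wordpieces wordpiece_labels sent_mwt_labels wordpiece_ends end_piece_ids max_input_length)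

-- ===== LEMMAS AND PROOFS =====

theorem cutZ_pos (epids : List Int) (need : Int) :
    ∀ (zs : List ((String × Int) × Int × Int)) (j : Int) (k : Nat),
      cutZ epids need zs j = some k → 1 ≤ k := by
  intro zs
  induction zs with
  | nil => intro j k h; simp [cutZ] at h
  | cons z rest ih =>
    obtain ⟨⟨wp, wpid⟩, wl, we⟩ := z
    intro j k h
    simp only [cutZ] at h
    split at h
    · simp at h; omega
    · cases hc : cutZ epids need rest (j + 1) with
      | none => rw [hc] at h; simp at h
      | some m => rw [hc] at h; simp at h; omega

theorem peelF_fuel (epids : List Int) (need : Int) :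
    ∀ (n m : Nat) (zs : List ((String × Int) × Int × Int)) (sent : List Int),
      zs.length ≤ n → zs.length ≤ m →
      peelF epids need n zs sent = peelF epids need m zs sent := by
  intro n
  induction n with
  | zero =>
    intro m zs sent hn _
    cases zs with
    | nil => cases m <;> simp [peelF]
    | cons z t => simp at hn
  | succ n ih =>
    intro m zs sent hn hm
    cases zs with
    | nil => cases m <;> simp [peelF]
    | cons z t =>
      cases m with
      | zero => simp at hm
      | succ m =>
        simp only [peelF]
        cases hc : cutZ epids need (z :: t) 1 with
        | none => rfl
        | some k =>
          have hk := cutZ_pos epids need (z :: t) 1 k hc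
          have hlt : ((z :: t).drop k).length ≤ n := by
            simp [List.length_drop]; simp at hn; omega
          have hlt' : ((z :: t).drop k).length ≤ m := by
            simp [List.length_drop]; simp at hm; omega
          exact congrArg _ (ih m _ _ hlt hlt')

-- one unfolding step of peel on a non-empty list
theorem peel_cons (epids : List Int) (need : Int)
    (z : (String × Int) × Int × Int) (zs : List ((String × Int) × Int × Int))
    (sent : List Int) :
    peel epids need (z :: zs) sent =
      match cutZ epids need (z :: zs) 1 with
      | none =>
          [((z :: zs).map (·.1), (z :: zs).map (·.2.1),
            sent.take ((z :: zs).countP (fun t => t.2.1 == 3 || t.2.1 == 4)),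
            (z :: zs).map (·.2.2), epids)]
      | some k =>
          (((z :: zs).take k).map (·.1), ((z :: zs).take k).map (·.2.1),
           sent.take (((z :: zs).take k).countP (fun t => t.2.1 == 3 || t.2.1 == 4)),
           ((z :: zs).take k).map (·.2.2), epids)
            :: peel epids need ((z :: zs).drop k)
                 (sent.drop (((z :: zs).take k).countP (fun t => t.2.1 == 3 || t.2.1 == 4))) := by
  unfold peel
  simp only [List.length_cons, peelF]
  cases hc : cutZ epids need (z :: zs) 1 with
  | none => rfl
  | some k =>
    have hk := cutZ_pos epids need (z :: zs) 1 k hc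
    have h1 : ((z :: zs).drop k).length ≤ zs.length := by
      simp [List.length_drop]; omega
    exact congrArg _ (peelF_fuel epids need zs.length ((z :: zs).drop k).length _ _ h1 le_rfl)

def c34 (zs : List ((String × Int) × Int × Int)) : Nat :=
  zs.countP (fun t => t.2.1 == 3 || t.2.1 == 4)

-- B's computation with a partially built group (s0,s1,subm,s3) carried in:
-- the denotation of A's loop state.
def peelPre (epids : List Int) (need : Int) (zs : List ((String × Int) × Int × Int))
    (sentR : List Int) (s0 : List (String × Int)) (s1 subm s3 : List Int) :
    List ((List (String × Int)) × List Int × List Int × List Int × List Int) :=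
  match cutZ epids need zs ((s0.length : Int) + 1) with
  | none =>
      if zs.isEmpty && s0.isEmpty then []
      else [(s0 ++ zs.map (·.1), s1 ++ zs.map (·.2.1), subm ++ sentR.take (c34 zs),
             s3 ++ zs.map (·.2.2), epids)]
  | some k =>
      (s0 ++ (zs.take k).map (·.1), s1 ++ (zs.take k).map (·.2.1),
       subm ++ sentR.take (c34 (zs.take k)), s3 ++ (zs.take k).map (·.2.2), epids)
        :: peel epids need (zs.drop k) (sentR.drop (c34 (zs.take k)))

theorem take_one_drop (l : List Int) (m : Nat) (h : m < l.length) :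
    (l.drop m).take 1 = [l.getD m 0] := by
  rw [List.drop_eq_getElem_cons h, List.getD_eq_getElem?_getD, List.getElem?_eq_getElem h]
  rfl

theorem take_cons_drop (sent : List Int) (mwt c : Nat) (h : mwt < sent.length) :
    (sent.drop mwt).take (1 + c) = sent.getD mwt 0 :: (sent.drop (mwt + 1)).take c := by
  rw [List.take_add, take_one_drop sent mwt h, List.drop_drop]
  rfl

theorem peelPre_empty (epids : List Int) (need : Int)
    (zs : List ((String × Int) × Int × Int)) (sent : List Int) :
    peelPre epids need zs sent [] [] [] [] = peel epids need zs sent := by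
  cases zs with
  | nil => simp [peelPre, cutZ, peel, peelF]
  | cons z rest =>
    rw [peel_cons]
    unfold peelPre
    simp only [List.length_nil, Int.natCast_zero, Int.zero_add, c34]
    cases hc : cutZ epids need (z :: rest) 1 with
    | none => simp
    | some k => simp

theorem loopA_peelPre (sent epids : List Int) (mil : Int) :
    ∀ (zs : List ((String × Int) × Int × Int))
      (acc : List ((List (String × Int)) × List Int × List Int × List Int × List Int))
      (s0 : List (String × Int)) (s1 subm s3 : List Int) (mwt : Nat),
      mwt + c34 zs ≤ sent.length →
      loopA sent epids mil zs acc s0 s1 subm s3 mwt =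
        acc ++ peelPre epids (mil - 10) zs (sent.drop mwt) s0 s1 subm s3 := by
  intro zs
  induction zs with
  | nil =>
    intro acc s0 s1 subm s3 mwt _
    cases s0 with
    | nil => simp [loopA, peelPre, cutZ, c34]
    | cons a as => simp [loopA, peelPre, cutZ, c34]
  | cons z rest ih =>
    obtain ⟨⟨wp, wpid⟩, wl, we⟩ := z
    intro acc s0 s1 subm s3 mwt hm
    have hc34 : ∀ l : List ((String × Int) × Int × Int),
        c34 (((wp, wpid), wl, we) :: l)
        = (if wl = 3 ∨ wl = 4 then 1 else 0) + c34 l := by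
      intro l
      by_cases hl : wl = 3 ∨ wl = 4
      · rcases hl with h | h <;> simp [c34, List.countP_cons, h] <;> omega
      · have h3 : ¬ wl = 3 := fun h => hl (Or.inl h)
        have h4 : ¬ wl = 4 := fun h => hl (Or.inr h)
        simp [c34, List.countP_cons, h3, h4]
    by_cases h2 : wpid ∈ epids ∧ (s0.length : Int) + 1 ≥ mil - 10
    · -- cut here: group closes with this element
      have hcond : wpid ∈ epids ∧ (((s0 ++ [(wp, wpid)]).length : Int)) ≥ mil - 10 := by
        refine ⟨h2.1, ?_⟩
        have := h2.2
        simp only [List.length_append, List.length_cons, List.length_nil]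
        push_cast
        omega
      have hcut : cutZ epids (mil - 10) (((wp, wpid), wl, we) :: rest)
          ((s0.length : Int) + 1) = some 1 := by
        simp only [cutZ, if_pos h2]
      have ihh : (if wl = 3 ∨ wl = 4 then mwt + 1 else mwt) + c34 rest ≤ sent.length := by
        rw [hc34 rest] at hm; split_ifs at hm ⊢ <;> omega
      simp only [loopA, if_pos hcond]
      rw [ih _ _ _ _ _ _ ihh]
      rw [peelPre_empty]
      conv_rhs => rw [peelPre]
      simp only [hcut]
      have ht1 : (((wp, wpid), wl, we) :: rest).take 1 = [((wp, wpid), wl, we)] := rfl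
      have hd1 : (((wp, wpid), wl, we) :: rest).drop 1 = rest := rfl
      rw [ht1, hd1]
      by_cases hl : wl = 3 ∨ wl = 4
      · have hcz : c34 [((wp, wpid), wl, we)] = 1 := by
          rcases hl with h | h <;> simp [c34, List.countP_cons, h]
        have hmlt : mwt < sent.length := by
          rw [hc34 rest] at hm; rw [if_pos hl] at hm; omega
        rw [hcz]
        simp [hl, take_one_drop sent mwt hmlt, List.drop_drop, List.append_assoc]
      · have hcz : c34 [((wp, wpid), wl, we)] = 0 := by
          have h3 : ¬ wl = 3 := fun h => hl (Or.inl h)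
          have h4 : ¬ wl = 4 := fun h => hl (Or.inr h)
          simp [c34, List.countP_cons, h3, h4]
        rw [hcz]
        simp [hl, List.append_assoc]
    · -- no cut: element joins the open group
      have hcond : ¬ (wpid ∈ epids ∧ (((s0 ++ [(wp, wpid)]).length : Int)) ≥ mil - 10) := by
        intro hh
        exact h2 ⟨hh.1, by
          have := hh.2
          simp only [List.length_append, List.length_cons, List.length_nil] at this
          push_cast at this
          omega⟩
      have hcut : cutZ epids (mil - 10) (((wp, wpid), wl, we) :: rest)
          ((s0.length : Int) + 1)
          = (cutZ epids (mil - 10) rest ((s0.length : Int) + 1 + 1)).map Nat.succ := by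
        simp only [cutZ, if_neg h2]
      have ihh : (if wl = 3 ∨ wl = 4 then mwt + 1 else mwt) + c34 rest ≤ sent.length := by
        rw [hc34 rest] at hm; split_ifs at hm ⊢ <;> omega
      simp only [loopA, if_neg hcond]
      rw [ih _ _ _ _ _ _ ihh]
      congr 1
      have hlen2 : ((((s0 ++ [(wp, wpid)]).length : Int)) + 1) = (s0.length : Int) + 1 + 1 := by
        simp only [List.length_append, List.length_cons, List.length_nil]
        push_cast
        ring
      conv_lhs => rw [peelPre]
      conv_rhs => rw [peelPre]
      rw [hlen2, hcut]
      cases hrest : cutZ epids (mil - 10) rest ((s0.length : Int) + 1 + 1) with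
      | none =>
        simp only [Option.map_none]
        have hne : ((s0 ++ [(wp, wpid)]).isEmpty) = false := by simp
        by_cases hl : wl = 3 ∨ wl = 4
        · have hmlt : mwt < sent.length := by
            rw [hc34 rest] at hm; rw [if_pos hl] at hm; omega
          simp [hl, hne, List.append_assoc, hc34 rest,
            take_cons_drop sent mwt (c34 rest) hmlt]
        · have hsub : c34 (((wp, wpid), wl, we) :: rest) = c34 rest := by
            rw [hc34 rest, if_neg hl]; omega
          simp [hl, hne, List.append_assoc, hsub]
      | some k =>
        simp only [Option.map_some]
        have htk : (((wp, wpid), wl, we) :: rest).take (k + 1)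
            = ((wp, wpid), wl, we) :: rest.take k := List.take_succ_cons
        have hdk : (((wp, wpid), wl, we) :: rest).drop (k + 1) = rest.drop k :=
          List.drop_succ_cons
        rw [htk, hdk]
        by_cases hl : wl = 3 ∨ wl = 4
        · have hmlt : mwt < sent.length := by
            rw [hc34 rest] at hm; rw [if_pos hl] at hm; omega
          have hdd : (sent.drop (mwt + 1)).drop (c34 (rest.take k))
              = (sent.drop mwt).drop (1 + c34 (rest.take k)) := by
            rw [List.drop_drop, List.drop_drop]
            congr 1
            omega
          simp [hl, hc34 (rest.take k), List.append_assoc, hdd,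
            take_cons_drop sent mwt (c34 (rest.take k)) hmlt]
        · have hcc : c34 (((wp, wpid), wl, we) :: rest.take k)
              = c34 (rest.take k) := by rw [hc34 (rest.take k), if_neg hl]; omega
          simp [hl, hcc, List.append_assoc]

-- ===== VERDICT (by name: the statement is the Claim_ definition above) =====
theorem split_to_subsequences_spec : Claim_equal_split_to_subsequences := by
  intro wp wl sm we ep mil _ hpre
  unfold Spec_split_to_subsequences split_to_subsequences split_to_subsequences_alt
  rw [loopA_peelPre sm ep mil _ [] [] [] [] [] 0 (by simpa [c34] using hpre)]
  simp [peelPre_empty]
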